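-- pv_equiv track=rewrite | github.com/pypi-data/pypi-mirror-390 | packages/tds-flatpath/tds_flatpath-0.1.0.tar.gz/tds_flatpath-0.1.0/src/tds_flatpath/codec.py | _postfix_from_segments
-- ===== SOURCE A (Python) =====
-- def _postfix_from_segments(segments):
--     """
--     Construct the collision-proof postfix string from a sequence of path segments.
--
--     Each segment is scanned in order:
--       - For every consecutive run of '_' characters, append 'n' + HEX(count), uppercase.
--       - After each segment (except the last), append a hyphen '-' to mark a directory boundary.
--       - If no underscores are found in any segment, the postfix is a single '-'.
--
--     The resulting string encodes both underscore density and directory depth,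
--     ensuring a deterministic, reversible mapping when combined with the flattened name.
--     """
--     parts = []
--     for idx, seg in enumerate(segments):
--         i = 0
--         while i < len(seg):
--             if seg[i] == "_":
--                 j = i
--                 while j < len(seg) and seg[j] == "_":
--                     j += 1
--                 parts.append("n" + format(j - i, "X"))
--                 i = j
--             else:
--                 i += 1
--         if idx < len(segments) - 1:
--             parts.append("-")
--     return "".join(parts) if parts else "-"
-- ===== SOURCE B (Python) =====
-- def _postfix_from_segments(segments):
--     def body(seg):
--         # Mask every non-underscore character to a space, then let str.split()
--         # extract the maximal underscore runs; no explicit run detection needed.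
--         masked = "".join(c if c == "_" else " " for c in seg)
--         return "".join("n" + format(len(run), "X") for run in masked.split())
--
--     return "-".join(body(seg) for seg in segments) or "-"
-- ===== Notes on version B (the rewrite author's own statement) =====
-- stated objective: idiomatic
-- what changed: A's nested index-based while loops that detect and measure each underscore run are replaced by a mask-then-split pipeline: every non-underscore character is rewritten to a space and str.split() yields the maximal underscore runs directly, whose lengths are hex-formatted; the enumerate/idx boundary bookkeeping becomes '-'.join over per-segment bodies with an 'or' fallback.
import Mathlib
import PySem

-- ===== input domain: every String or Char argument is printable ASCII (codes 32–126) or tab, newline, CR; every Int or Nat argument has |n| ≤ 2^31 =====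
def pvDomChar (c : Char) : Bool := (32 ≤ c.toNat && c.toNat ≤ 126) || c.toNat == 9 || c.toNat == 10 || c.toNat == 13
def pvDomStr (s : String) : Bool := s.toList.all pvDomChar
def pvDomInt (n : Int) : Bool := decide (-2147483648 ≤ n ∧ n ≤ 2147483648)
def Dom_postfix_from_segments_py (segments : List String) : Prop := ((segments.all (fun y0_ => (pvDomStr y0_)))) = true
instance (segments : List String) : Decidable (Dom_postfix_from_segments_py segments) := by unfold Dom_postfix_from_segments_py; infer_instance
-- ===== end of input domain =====

-- B replaces A's nested index-based run-detection loops by a mask-then-split pipeline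
-- (non-underscore chars become spaces, str.split() yields the underscore runs) and the
-- enumerate/idx boundary bookkeeping by a '-'.join over segments (objective: idiomatic).

-- shared helper: format(n, "X"), uppercase hexadecimal of a nonnegative count
def pvHexDigit (n : Nat) : Char := if n < 10 then Char.ofNat (48 + n) else Char.ofNat (55 + n)

def pvHex (n : Nat) : String :=
  if _h : n < 16 then String.ofList [pvHexDigit n]
  else pvHex (n / 16) ++ String.ofList [pvHexDigit (n % 16)]
termination_by n
decreasing_by exact Nat.div_lt_self (by omega) (by omega)

-- ===== PORT A =====
-- inner 'while j < len(seg) and seg[j] == "_"': length of the leading underscore run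
def pvLeadUnd : List Char → Nat
  | [] => 0
  | c :: r => if c = '_' then 1 + pvLeadUnd r else 0

-- the 'while i < len(seg)' index scan: advance one char, or past a whole underscore run
def pvScanA : List Char → List String
  | [] => []
  | c :: rest =>
    if c = '_' then
      ("n" ++ pvHex (1 + pvLeadUnd rest)) :: pvScanA (rest.drop (pvLeadUnd rest))
    else pvScanA rest
termination_by l => l.length
decreasing_by all_goals (simp; try omega)

-- 'for idx, seg in enumerate(segments)' with the 'idx < len(segments) - 1' hyphen
def pvOuterA (segs : List String) (idx : Nat) (n : Nat) (parts : List String) : List String :=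
  match segs with
  | [] => parts
  | seg :: rest =>
      pvOuterA rest (idx + 1) n
        ((parts ++ pvScanA seg.toList) ++ (if idx < n - 1 then ["-"] else []))

def postfix_from_segments_py (segments : List String) : String :=
  let parts := pvOuterA segments 0 segments.length []
  if parts.isEmpty then "-" else PySem.Str.join "" parts

-- ===== PORT B =====
-- '"".join(c if c == "_" else " " for c in seg)': a ''.join of one-character strings is
-- exactly the per-character map over the string's characters (exact on every input)
def pvSegBody (seg : String) : String :=
  let masked : String := String.ofList (seg.toList.map (fun c => if c = '_' then c else ' '))
  PySem.Str.join "" ((PySem.Str.split₀ masked).map (fun run => "n" ++ pvHex (PySem.Str.len run).toNat))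

def postfix_from_segments_py_alt (segments : List String) : String :=
  let body := PySem.Str.join "-" (segments.map pvSegBody)
  if body = "" then "-" else body

-- ===== PRECONDITION & SPEC =====
def Spec_postfix_from_segments_py (segments : List String) (out : String) : Prop := out = postfix_from_segments_py_alt segments
instance (segments : List String) (out : String) : Decidable (Spec_postfix_from_segments_py segments out) := by unfold Spec_postfix_from_segments_py; infer_instance

-- ===== CLAIM (what is proved, stated in full; the proofs are below) =====
def Claim_equal_postfix_from_segments_py : Prop := ∀ (segments : List String), Dom_postfix_from_segments_py segments → Spec_postfix_from_segments_py segments (postfix_from_segments_py segments)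

-- ===== LEMMAS AND PROOFS =====

-- proof-only helper: the words str.split() extracts from the masked segment, described
-- by the same run structure pvScanA follows
def pvRunsW : List Char → List (List Char)
  | [] => []
  | c :: rest =>
    if c = '_' then
      List.replicate (1 + pvLeadUnd rest) '_' :: pvRunsW (rest.drop (pvLeadUnd rest))
    else pvRunsW rest
termination_by l => l.length
decreasing_by all_goals (simp; try omega)

-- behaviour of split₀'s worker on a masked list, with the current word an underscore run
theorem pvGo_spec (l : List Char) : ∀ (acc : List (List Char)),
    (PySem.Chars.split₀.go (l.map (fun c => if c = '_' then c else ' ')) [] acc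
        = acc.reverse ++ pvRunsW l) ∧
    (∀ count, 0 < count →
      PySem.Chars.split₀.go (l.map (fun c => if c = '_' then c else ' '))
          (List.replicate count '_') acc
        = acc.reverse ++ List.replicate (count + pvLeadUnd l) '_'
            :: pvRunsW (l.drop (pvLeadUnd l))) := by
  induction l with
  | nil =>
    intro acc
    constructor
    · simp [PySem.Chars.split₀.go, pvRunsW]
    · intro count hc
      simp [PySem.Chars.split₀.go, pvRunsW, pvLeadUnd, Nat.pos_iff_ne_zero.mp hc]
  | cons c rest ih =>
    intro acc
    by_cases hc : c = '_'
    · subst hc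
      constructor
      · rw [show ('_' :: rest).map (fun c => if c = '_' then c else ' ')
              = '_' :: rest.map (fun c => if c = '_' then c else ' ') by simp]
        rw [show PySem.Chars.split₀.go ('_' :: rest.map (fun c => if c = '_' then c else ' ')) [] acc
              = PySem.Chars.split₀.go (rest.map (fun c => if c = '_' then c else ' ')) ['_'] acc by
            simp [PySem.Chars.split₀.go, PySem.Chars.isspace]]
        rw [show (['_'] : List Char) = List.replicate 1 '_' by rfl]
        rw [(ih acc).2 1 (by omega)]
        simp [pvRunsW, Nat.add_comm]
      · intro count hcount
        rw [show ('_' :: rest).map (fun c => if c = '_' then c else ' ')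
              = '_' :: rest.map (fun c => if c = '_' then c else ' ') by simp]
        rw [show PySem.Chars.split₀.go ('_' :: rest.map (fun c => if c = '_' then c else ' '))
                (List.replicate count '_') acc
              = PySem.Chars.split₀.go (rest.map (fun c => if c = '_' then c else ' '))
                ('_' :: List.replicate count '_') acc by
            simp [PySem.Chars.split₀.go, PySem.Chars.isspace]]
        rw [show ('_' :: List.replicate count '_') = List.replicate (count + 1) '_' by
            simp [List.replicate_succ]]
        rw [(ih acc).2 (count + 1) (by omega)]
        have h1 : pvLeadUnd ('_' :: rest) = pvLeadUnd rest + 1 := by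
          simp [pvLeadUnd]; omega
        have h2 : count + 1 + pvLeadUnd rest = count + (pvLeadUnd rest + 1) := by omega
        rw [h1, h2, List.drop_succ_cons]
    · have hmap : (c :: rest).map (fun c => if c = '_' then c else ' ')
          = ' ' :: rest.map (fun c => if c = '_' then c else ' ') := by simp [hc]
      constructor
      · rw [hmap]
        rw [show PySem.Chars.split₀.go (' ' :: rest.map (fun c => if c = '_' then c else ' ')) [] acc
              = PySem.Chars.split₀.go (rest.map (fun c => if c = '_' then c else ' ')) [] acc by
            simp [PySem.Chars.split₀.go, PySem.Chars.isspace]]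
        rw [(ih acc).1]
        simp [pvRunsW, hc]
      · intro count hcount
        rw [hmap]
        rw [show PySem.Chars.split₀.go (' ' :: rest.map (fun c => if c = '_' then c else ' '))
                (List.replicate count '_') acc
              = PySem.Chars.split₀.go (rest.map (fun c => if c = '_' then c else ' ')) []
                ((List.replicate count '_').reverse :: acc) by
            simp [PySem.Chars.split₀.go, PySem.Chars.isspace,
              Nat.pos_iff_ne_zero.mp hcount]]
        rw [(ih _).1]
        simp [pvLeadUnd, hc, pvRunsW, List.reverse_replicate]

-- str.split() on the masked segment returns exactly the underscore-run words
theorem pvSplit_mask (l : List Char) :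
    PySem.Chars.split₀ (l.map (fun c => if c = '_' then c else ' ')) = pvRunsW l := by
  have h := (pvGo_spec l []).1
  simpa [PySem.Chars.split₀] using h

-- A's per-segment parts are the hex-coded lengths of those words
theorem pvScanA_runsW (l : List Char) :
    pvScanA l = (pvRunsW l).map (fun w => "n" ++ pvHex w.length) := by
  induction l using pvScanA.induct with
  | case1 => simp [pvScanA, pvRunsW]
  | case2 r ih =>
    rw [show pvScanA ('_' :: r)
          = ("n" ++ pvHex (1 + pvLeadUnd r)) :: pvScanA (r.drop (pvLeadUnd r)) from by
        simp [pvScanA]]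
    rw [show pvRunsW ('_' :: r)
          = List.replicate (1 + pvLeadUnd r) '_' :: pvRunsW (r.drop (pvLeadUnd r)) from by
        simp [pvRunsW]]
    simp [ih]
  | case3 c r hc ih =>
    simpa [pvScanA, pvRunsW, hc] using ih

theorem pvSegBody_eq (s : String) : pvSegBody s = PySem.Str.join "" (pvScanA s.toList) := by
  unfold pvSegBody PySem.Str.split₀
  simp only [String.toList_ofList, pvSplit_mask, List.map_map, pvScanA_runsW]
  congr 1
  apply List.map_congr_left
  intro w _
  simp [PySem.Str.len]

-- every part A emits inside a segment starts with 'n'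
theorem pvScanA_forall (l : List Char) : ∀ x ∈ pvScanA l, ∃ t, x = "n" ++ t := by
  induction l using pvScanA.induct with
  | case1 => simp [pvScanA]
  | case2 r ih =>
    intro x hx
    rw [show pvScanA ('_' :: r)
          = ("n" ++ pvHex (1 + pvLeadUnd r)) :: pvScanA (r.drop (pvLeadUnd r)) from by
        simp [pvScanA]] at hx
    rcases List.mem_cons.mp hx with rfl | h2
    · exact ⟨_, rfl⟩
    · exact ih x h2
  | case3 c r hc ih =>
    simpa [pvScanA, hc] using ih

-- proof-only helper: the list of parts A accumulates, described structurally
def pvInter : List String → List String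
  | [] => []
  | [s] => pvScanA s.toList
  | s :: rest => pvScanA s.toList ++ "-" :: pvInter rest

theorem pvOuterA_eq (segs : List String) : ∀ (idx n : Nat) (parts : List String),
    idx + segs.length = n → pvOuterA segs idx n parts = parts ++ pvInter segs := by
  induction segs with
  | nil => intro idx n parts h; simp [pvOuterA, pvInter]
  | cons s rest ih =>
    intro idx n parts h
    cases rest with
    | nil =>
      simp only [pvOuterA]
      have : ¬ idx < n - 1 := by simp at h; omega
      simp [this, pvInter]
    | cons t r =>
      have hstep : pvOuterA (s :: t :: r) idx n parts
          = pvOuterA (t :: r) (idx + 1) n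
              ((parts ++ pvScanA s.toList) ++ (if idx < n - 1 then ["-"] else [])) := rfl
      have hlt : idx < n - 1 := by simp at h; omega
      rw [hstep, ih (idx + 1) n _ (by simp at h ⊢; omega)]
      simp [hlt, pvInter]

theorem str_join_nil (sep : String) : PySem.Str.join sep [] = "" := by
  apply String.toList_inj.mp
  simp [PySem.Str.toList_join, PySem.Chars.join_nil]

theorem str_join_singleton (sep p : String) : PySem.Str.join sep [p] = p := by
  apply String.toList_inj.mp
  simp [PySem.Str.toList_join, PySem.Chars.join_singleton]

theorem chars_join_ne_nil (sep p : List Char) (ps : List (List Char)) (hp : p ≠ []) :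
    PySem.Chars.join sep (p :: ps) ≠ [] := by
  cases ps with
  | nil => simpa [PySem.Chars.join_singleton] using hp
  | cons q qs => simp [PySem.Chars.join_cons_cons, hp]

theorem str_join_ne_empty (sep p : String) (ps : List String) (hp : p ≠ "") :
    PySem.Str.join sep (p :: ps) ≠ "" := by
  intro h
  have h' := congrArg String.toList h
  rw [PySem.Str.toList_join] at h'
  exact chars_join_ne_nil sep.toList p.toList (ps.map String.toList)
    (fun hn => hp (by apply String.toList_inj.mp; simpa using hn)) (by simpa using h')

theorem join_inter_eq (segs : List String) :
    PySem.Str.join "" (pvInter segs)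
      = PySem.Str.join "-" (segs.map (fun s => PySem.Str.join "" (pvScanA s.toList))) := by
  induction segs with
  | nil => simp [pvInter, str_join_nil]
  | cons s rest ih =>
    cases rest with
    | nil => simp [pvInter, str_join_singleton]
    | cons t r =>
      apply String.toList_inj.mp
      have flat : ∀ (ps : List (List Char)), PySem.Chars.join [] ps = ps.flatten := by
        intro ps
        induction ps with
        | nil => simp [PySem.Chars.join_nil]
        | cons p qs ihp =>
          cases qs with
          | nil => simp [PySem.Chars.join_singleton]
          | cons q r' => simp [PySem.Chars.join_cons_cons] at ihp ⊢; simp [ihp]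
      have ih' := congrArg String.toList ih
      simp only [PySem.Str.toList_join, show ("" : String).toList = [] from rfl,
        show ("-" : String).toList = ['-'] from rfl, flat] at ih'
      rw [show pvInter (s :: t :: r) = pvScanA s.toList ++ "-" :: pvInter (t :: r) from rfl]
      simp only [PySem.Str.toList_join, show ("" : String).toList = [] from rfl,
        show ("-" : String).toList = ['-'] from rfl, flat, List.map_cons, List.map_append,
        List.flatten_append, List.flatten_cons, PySem.Chars.join_cons_cons]
      rw [ih']
      simp [flat, List.append_assoc]

-- head of pvInter (s :: t :: r) is nonempty, so its join is a nonempty string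
theorem join_inter_two_ne (s t : String) (r : List String) :
    PySem.Str.join "" (pvInter (s :: t :: r)) ≠ "" := by
  have hparts : pvInter (s :: t :: r) = pvScanA s.toList ++ "-" :: pvInter (t :: r) := rfl
  rw [hparts]
  rcases hsc : pvScanA s.toList with _ | ⟨p, ps⟩
  · simpa using str_join_ne_empty "" "-" (pvInter (t :: r)) (by decide)
  · have hp : p ≠ "" := by
      obtain ⟨u, rfl⟩ := pvScanA_forall s.toList p (by rw [hsc]; simp)
      simp
    simpa using str_join_ne_empty "" p (ps ++ "-" :: pvInter (t :: r)) hp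

-- ===== VERDICT (by name: the statement is the Claim_ definition above) =====
theorem postfix_from_segments_py_spec : Claim_equal_postfix_from_segments_py := by
  intro segments _
  unfold Spec_postfix_from_segments_py postfix_from_segments_py postfix_from_segments_py_alt
  simp only [pvOuterA_eq segments 0 segments.length [] (by omega), List.nil_append]
  have hbody : PySem.Str.join "-" (segments.map pvSegBody)
      = PySem.Str.join "" (pvInter segments) := by
    rw [join_inter_eq]
    exact congrArg (PySem.Str.join "-") (List.map_congr_left (fun s _ => pvSegBody_eq s))
  rw [hbody]
  cases segments with
  | nil => simp [pvInter, str_join_nil]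
  | cons s rest =>
    cases rest with
    | nil =>
      simp only [pvInter]
      rcases h : pvScanA s.toList with _ | ⟨p, ps⟩
      · simp [str_join_nil]
      · have hp : p ≠ "" := by
          obtain ⟨u, rfl⟩ := pvScanA_forall s.toList p (by rw [h]; simp)
          simp
        have hne : PySem.Str.join "" (p :: ps) ≠ "" := str_join_ne_empty "" p ps hp
        simp [hne]
    | cons t r =>
      have hne2 : pvInter (s :: t :: r) ≠ [] := by
        show pvScanA s.toList ++ "-" :: pvInter (t :: r) ≠ []
        simp
      simp [hne2, join_inter_two_ne s t r, List.isEmpty_iff]
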